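-- pv_equiv track=rewrite | github.com/minerllabs/baselines | general/chainerrl/baselines/action_wrappers.py | generate_mapping
-- ===== SOURCE A (Python) =====
-- from collections import OrderedDict
--
-- NUM_ENUM_ACTIONS = {
--     'MineRLTreechop-v0': {},
--     'MineRLNavigate-v0': OrderedDict([
--         ('place', 2),
--     ]),
--     'MineRLNavigateExtreme-v0': OrderedDict([
--         ('place', 2),
--     ]),
--     'MineRLObtainIronPickaxe-v0': OrderedDict([
--         ('place', 7),
--         ('equip', 7),
--         ('craft', 5),
--         ('nearbyCraft', 8),
--         ('nearbySmelt', 3),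
--     ]),
--     'MineRLObtainDiamond-v0': OrderedDict([
--         ('place', 7),
--         ('equip', 7),
--         ('craft', 5),
--         ('nearbyCraft', 8),
--         ('nearbySmelt', 3),
--     ]),
-- }
--
-- def generate_mapping(env_name, actions, num_camera_discretize,
--                      allow_pitch=False, exclude_noop=False):
--     '''
--     Generate a mapping function from action names to indices.
--     '''
--     discrete_indices = {}
--     agent_index = 0 if exclude_noop else 1
--     for key in actions:
--         discrete_indices[key] = agent_index
--         if key == 'camera':
--             agent_index += num_camera_discretize - 1
--             if allow_pitch:
--                 agent_index += num_camera_discretize - 1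
--         elif key in NUM_ENUM_ACTIONS[env_name]:
--             agent_index += NUM_ENUM_ACTIONS[env_name][key] - 1
--         else:
--             # BINARY_KEYS
--             agent_index += 1
--
--     return discrete_indices
-- ===== SOURCE B (Python) =====
-- NUM_ENUM_ACTIONS = {
--     'MineRLTreechop-v0': {},
--     'MineRLNavigate-v0': {'place': 2},
--     'MineRLNavigateExtreme-v0': {'place': 2},
--     'MineRLObtainIronPickaxe-v0': {
--         'place': 7, 'equip': 7, 'craft': 5, 'nearbyCraft': 8, 'nearbySmelt': 3},
--     'MineRLObtainDiamond-v0': {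
--         'place': 7, 'equip': 7, 'craft': 5, 'nearbyCraft': 8, 'nearbySmelt': 3},
-- }
--
--
-- def generate_mapping(env_name, actions, num_camera_discretize,
--                      allow_pitch=False, exclude_noop=False):
--     '''Each key's index is computed independently: base index plus the total
--     width of all actions before it — no running accumulator at all.'''
--     def step(key):
--         if key == 'camera':
--             return (num_camera_discretize - 1) * (2 if allow_pitch else 1)
--         return NUM_ENUM_ACTIONS[env_name].get(key, 2) - 1
--
--     base = 0 if exclude_noop else 1
--     return {key: base + sum(map(step, actions[:i]))
--             for i, key in enumerate(actions)}
-- ===== Notes on version B (the rewrite author's own statement) =====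
-- stated objective: alternative
-- what changed: Replaces A's stateful loop threading a running agent_index through insertions by a stateless dict comprehension that computes each key's index independently as base + sum of the widths of all preceding actions (closed form per element, O(n^2) instead of O(n)).
import Mathlib
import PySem

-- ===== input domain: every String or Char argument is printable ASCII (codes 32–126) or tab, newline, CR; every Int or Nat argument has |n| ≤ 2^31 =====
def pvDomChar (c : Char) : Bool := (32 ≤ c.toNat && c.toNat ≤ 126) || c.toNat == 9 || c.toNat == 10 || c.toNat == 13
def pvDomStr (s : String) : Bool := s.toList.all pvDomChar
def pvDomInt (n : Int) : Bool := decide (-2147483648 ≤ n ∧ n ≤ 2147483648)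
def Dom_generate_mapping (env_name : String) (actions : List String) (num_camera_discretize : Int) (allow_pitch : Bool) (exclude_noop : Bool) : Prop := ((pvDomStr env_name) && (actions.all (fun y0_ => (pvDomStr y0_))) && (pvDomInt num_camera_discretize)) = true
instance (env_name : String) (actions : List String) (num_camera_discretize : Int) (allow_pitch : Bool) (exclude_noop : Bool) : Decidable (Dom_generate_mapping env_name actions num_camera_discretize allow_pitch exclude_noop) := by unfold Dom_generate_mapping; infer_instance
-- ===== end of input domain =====

-- B replaces A's stateful index-threading loop by a stateless dict comprehension: each
-- key's index is computed independently as base + the summed widths of the actions before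
-- it (closed form per element, quadratic instead of linear; objective: alternative).

-- ===== PORT A =====
-- module-level constant NUM_ENUM_ACTIONS
def NUM_ENUM_ACTIONS : PySem.Dict String (PySem.Dict String Int) :=
  PySem.Dict.ofList [
    ("MineRLTreechop-v0", PySem.Dict.ofList []),
    ("MineRLNavigate-v0", PySem.Dict.ofList [("place", 2)]),
    ("MineRLNavigateExtreme-v0", PySem.Dict.ofList [("place", 2)]),
    ("MineRLObtainIronPickaxe-v0", PySem.Dict.ofList [("place", 7), ("equip", 7), ("craft", 5), ("nearbyCraft", 8), ("nearbySmelt", 3)]),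
    ("MineRLObtainDiamond-v0", PySem.Dict.ofList [("place", 7), ("equip", 7), ("craft", 5), ("nearbyCraft", 8), ("nearbySmelt", 3)])]

-- NUM_ENUM_ACTIONS[env_name] would raise KeyError on an unknown env_name; that input is
-- excluded by Pre_generate_mapping, so the port uses getD with an empty default there.
def generate_mapping (env_name : String) (actions : List String) (num_camera_discretize : Int) (allow_pitch : Bool) (exclude_noop : Bool) : List (String × Int) :=
  let st := actions.foldl (fun (st : PySem.Dict String Int × Int) key =>
    let d := st.1.insert key st.2
    if key == "camera" then
      let i := st.2 + (num_camera_discretize - 1)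
      let i := if allow_pitch then i + (num_camera_discretize - 1) else i
      (d, i)
    else
      match (NUM_ENUM_ACTIONS.getD env_name PySem.Dict.empty).get? key with
      | some v => (d, st.2 + v - 1)
      | none => (d, st.2 + 1))
    (PySem.Dict.empty, if exclude_noop then 0 else 1)
  st.1.items

-- ===== PORT B =====
-- Source B's local 'step' (the NUM_ENUM_ACTIONS[env_name] lookup uses getD for the same
-- Pre_-excluded KeyError reason as in port A)
def pvStep (env_name : String) (num_camera_discretize : Int) (allow_pitch : Bool) (key : String) : Int :=
  if key == "camera" then
    (num_camera_discretize - 1) * (if allow_pitch then 2 else 1)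
  else
    (NUM_ENUM_ACTIONS.getD env_name PySem.Dict.empty).getD key 2 - 1

-- the dict comprehension over enumerate(actions); actions[:i] is PySem.List.slice
def generate_mapping_alt (env_name : String) (actions : List String) (num_camera_discretize : Int) (allow_pitch : Bool) (exclude_noop : Bool) : List (String × Int) :=
  let base : Int := if exclude_noop then 0 else 1
  ((PySem.List.enumerate actions 0).foldl
    (fun (d : PySem.Dict String Int) p =>
      d.insert p.2 (base + ((PySem.List.slice actions none (some p.1)).map
        (fun key => pvStep env_name num_camera_discretize allow_pitch key)).sum))
    PySem.Dict.empty).items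

-- ===== PRECONDITION & SPEC =====
-- Pre_ excludes exactly the inputs where Python A raises KeyError: an env_name outside
-- NUM_ENUM_ACTIONS together with at least one non-'camera' action key.
def Pre_generate_mapping (env_name : String) (actions : List String) (num_camera_discretize : Int) (allow_pitch : Bool) (exclude_noop : Bool) : Prop :=
  NUM_ENUM_ACTIONS.contains env_name = true ∨ ∀ k ∈ actions, k = "camera"
instance (env_name : String) (actions : List String) (num_camera_discretize : Int) (allow_pitch : Bool) (exclude_noop : Bool) : Decidable (Pre_generate_mapping env_name actions num_camera_discretize allow_pitch exclude_noop) := by unfold Pre_generate_mapping; infer_instance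
def pvWitness_generate_mapping : String × List String × Int × Bool × Bool :=
  ("MineRLNavigate-v0", ["forward", "place", "camera", "jump"], 5, true, false)
def Spec_generate_mapping (env_name : String) (actions : List String) (num_camera_discretize : Int) (allow_pitch : Bool) (exclude_noop : Bool) (out : List (String × Int)) : Prop := out = generate_mapping_alt env_name actions num_camera_discretize allow_pitch exclude_noop
instance (env_name : String) (actions : List String) (num_camera_discretize : Int) (allow_pitch : Bool) (exclude_noop : Bool) (out : List (String × Int)) : Decidable (Spec_generate_mapping env_name actions num_camera_discretize allow_pitch exclude_noop out) := by unfold Spec_generate_mapping; infer_instance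

-- ===== CLAIM (what is proved, stated in full; the proofs are below) =====
def Claim_equal_generate_mapping : Prop := ∀ (env_name : String) (actions : List String) (num_camera_discretize : Int) (allow_pitch : Bool) (exclude_noop : Bool), Dom_generate_mapping env_name actions num_camera_discretize allow_pitch exclude_noop → Pre_generate_mapping env_name actions num_camera_discretize allow_pitch exclude_noop → Spec_generate_mapping env_name actions num_camera_discretize allow_pitch exclude_noop (generate_mapping env_name actions num_camera_discretize allow_pitch exclude_noop)

-- ===== LEMMAS AND PROOFS =====

-- the per-position starting indices, as the common mathematical object of both proofs
def pvScan (t : Int) : List Int → List Int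
  | [] => []
  | s :: ss => t :: pvScan (t + s) ss

-- A's fold produces the dict of keys zipped with the scanned indices
lemma pvA_eq (enum : PySem.Dict String Int) (ncd : Int) (pitch : Bool) (actions : List String) :
    ∀ (d : PySem.Dict String Int) (idx : Int),
    (actions.zip (pvScan idx (actions.map (fun key =>
        if key == "camera" then (ncd - 1) * (if pitch then 2 else 1)
        else enum.getD key 2 - 1)))).foldl
        (fun (d : PySem.Dict String Int) p => d.insert p.1 p.2) d
      = (actions.foldl (fun (st : PySem.Dict String Int × Int) key =>
          let d := st.1.insert key st.2
          if key == "camera" then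
            let i := st.2 + (ncd - 1)
            let i := if pitch then i + (ncd - 1) else i
            (d, i)
          else
            match enum.get? key with
            | some v => (d, st.2 + v - 1)
            | none => (d, st.2 + 1)) (d, idx)).1 := by
  induction actions with
  | nil => intro d idx; simp [pvScan]
  | cons k ks ih =>
      intro d idx
      simp only [List.map_cons, pvScan, List.zip_cons_cons, List.foldl_cons]
      by_cases hk : k == "camera"
      · simp only [hk, if_true]
        rw [ih]
        congr 2
        cases pitch <;> simp <;> ring
      · simp only [hk, if_false, Bool.false_eq_true]
        cases hg : enum.get? k with
        | some v =>
            rw [ih]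
            congr 2
            simp only [PySem.Dict.getD_eq_get?_getD, hg, Option.getD_some, Prod.mk.injEq]
            refine ⟨trivial, by ring⟩
        | none =>
            rw [ih]
            congr 2
            simp only [PySem.Dict.getD_eq_get?_getD, hg, Option.getD_none, Prod.mk.injEq]
            refine ⟨trivial, by ring⟩

-- B's prefix-sum comprehension also produces the dict of keys zipped with the scanned indices
lemma pvB_eq (step : String → Int) (base : Int) :
    ∀ (ks pre : List String) (d : PySem.Dict String Int),
    (PySem.List.enumerate ks (pre.length : Int)).foldl
      (fun (d : PySem.Dict String Int) p =>
        d.insert p.2 (base + ((PySem.List.slice (pre ++ ks) none (some p.1)).map step).sum)) d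
      = ((ks.zip (pvScan (base + (pre.map step).sum) (ks.map step))).foldl
          (fun (d : PySem.Dict String Int) p => d.insert p.1 p.2) d) := by
  intro ks
  induction ks with
  | nil => intro pre d; simp [pvScan, PySem.List.enumerate]
  | cons k ks ih =>
      intro pre d
      rw [PySem.List.enumerate_cons]
      simp only [List.map_cons, pvScan, List.zip_cons_cons, List.foldl_cons]
      have h1 : PySem.List.slice (pre ++ k :: ks) none (some (pre.length : Int)) = pre := by
        rw [PySem.List.slice_to_natCast]
        exact List.take_left
      rw [h1]
      have h2 := ih (pre ++ [k]) (d.insert k (base + (pre.map step).sum))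
      have h3 : ((pre ++ [k]).length : Int) = (pre.length : Int) + 1 := by
        simp
      rw [h3] at h2
      have h4 : pre ++ [k] ++ ks = pre ++ k :: ks := by simp
      rw [h4] at h2
      rw [h2]
      congr 2
      simp [add_assoc]

-- ===== VERDICT (by name: the statement is the Claim_ definition above) =====
theorem generate_mapping_spec : Claim_equal_generate_mapping := by
  intro env_name actions ncd pitch noop _ _
  unfold Spec_generate_mapping
  simp only [generate_mapping, generate_mapping_alt]
  have hB := pvB_eq (fun key => pvStep env_name ncd pitch key) (if noop then 0 else 1)
      actions [] PySem.Dict.empty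
  simp only [List.length_nil, Nat.cast_zero, List.nil_append, List.map_nil, List.sum_nil,
    add_zero] at hB
  rw [hB]
  congr 1
  exact (pvA_eq (NUM_ENUM_ACTIONS.getD env_name PySem.Dict.empty) ncd pitch actions
    PySem.Dict.empty (if noop then 0 else 1)).symm
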